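-- pv_equiv track=rewrite | github.com/snowflakedb/snowflake-connector-python | ci/anaconda/validate_deps_sync.py | compare_deps
-- ===== SOURCE A (Python) =====
-- from typing import Dict, Iterable, List, Tuple
--
-- def compare_deps(setup_deps: Iterable[str], meta_deps: Iterable[str]) -> str:
--     """Compare two dependency lists and return a human-readable diff.
--
--     Args:
--       setup_deps: Normalized dependencies from setup.cfg.
--       meta_deps: Normalized dependencies from meta.yaml.
--
--     Returns:
--       Empty string if equal, otherwise a multi-line diff description.
--     """
--
--     def to_map(items: Iterable[str]) -> Dict[str, str]:
--         mapping: Dict[str, str] = {}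
--         for it in items:
--             parts = it.split(" ", 1)
--             name = parts[0]
--             spec = parts[1] if len(parts) > 1 else ""
--             mapping[name] = spec
--         return mapping
--
--     s_map = to_map(setup_deps)
--     m_map = to_map(meta_deps)
--
--     s_names = set(s_map)
--     m_names = set(m_map)
--     missing = sorted(s_names - m_names)
--     extra = sorted(m_names - s_names)
--
--     mismatches: List[Tuple[str, str, str]] = []
--     for name in sorted(s_names & m_names):
--         if s_map.get(name, "") != m_map.get(name, ""):
--             mismatches.append((name, s_map.get(name, ""), m_map.get(name, "")))
--
--     if not (missing or extra or mismatches):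
--         return ""
--
--     lines: List[str] = []
--     if missing:
--         lines.append("Missing in meta.yaml run:")
--         for n in missing:
--             lines.append(f"  - {n} ({s_map[n] or 'no spec'})")
--     if extra:
--         lines.append("Extra in meta.yaml run:")
--         for n in extra:
--             lines.append(f"  - {n} ({m_map[n] or 'no spec'})")
--     if mismatches:
--         lines.append("Version spec mismatches:")
--         for n, s, m in mismatches:
--             lines.append(f"  - {n}: setup.cfg='{s}' vs meta.yaml='{m}'")
--     return "\n".join(lines)
-- ===== SOURCE B (Python) =====
-- def compare_deps(setup_deps, meta_deps):
--     """Compare two dependency lists and return a human-readable diff.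
--
--     Different algorithm from A: instead of hash maps plus three set
--     differences, dedup each input (last spec wins) by one reversed scan,
--     sort the resulting (name, spec) pair lists, and classify names with a
--     classic two-pointer merge of the two sorted lists.
--     """
--
--     def sorted_pairs(items):
--         seen = set()
--         pairs = []
--         for it in reversed(list(items)):
--             parts = it.split(" ", 1)
--             name = parts[0]
--             if name not in seen:
--                 seen.add(name)
--                 pairs.append((name, parts[1] if len(parts) > 1 else ""))
--         pairs.sort(key=lambda p: p[0])
--         return pairs
--
--     s = sorted_pairs(setup_deps)
--     m = sorted_pairs(meta_deps)
--
--     missing, extra, mismatches = [], [], []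
--     i = j = 0
--     while i < len(s) or j < len(m):
--         if j == len(m) or (i < len(s) and s[i][0] < m[j][0]):
--             name, spec = s[i]
--             i += 1
--             missing.append(f"  - {name} ({spec or 'no spec'})")
--         elif i == len(s) or m[j][0] < s[i][0]:
--             name, spec = m[j]
--             j += 1
--             extra.append(f"  - {name} ({spec or 'no spec'})")
--         else:
--             name, s_spec = s[i]
--             m_spec = m[j][1]
--             i += 1
--             j += 1
--             if s_spec != m_spec:
--                 mismatches.append(
--                     f"  - {name}: setup.cfg='{s_spec}' vs meta.yaml='{m_spec}'"
--                 )
--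
--     out = []
--     for header, body in (
--         ("Missing in meta.yaml run:", missing),
--         ("Extra in meta.yaml run:", extra),
--         ("Version spec mismatches:", mismatches),
--     ):
--         if body:
--             out.append(header)
--             out.extend(body)
--     return "\n".join(out)
-- ===== Notes on version B (the rewrite author's own statement) =====
-- stated objective: alternative
-- what changed: Replaces A's hash-map/set pipeline (two dicts, three sorted set operations, lookup-based rendering) by a sort-merge algorithm: each list is deduplicated last-wins in one reversed scan into (name, spec) pairs, the two pair lists are sorted, and a single two-pointer merge of the sorted lists classifies every name and emits its line directly.
import Mathlib
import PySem

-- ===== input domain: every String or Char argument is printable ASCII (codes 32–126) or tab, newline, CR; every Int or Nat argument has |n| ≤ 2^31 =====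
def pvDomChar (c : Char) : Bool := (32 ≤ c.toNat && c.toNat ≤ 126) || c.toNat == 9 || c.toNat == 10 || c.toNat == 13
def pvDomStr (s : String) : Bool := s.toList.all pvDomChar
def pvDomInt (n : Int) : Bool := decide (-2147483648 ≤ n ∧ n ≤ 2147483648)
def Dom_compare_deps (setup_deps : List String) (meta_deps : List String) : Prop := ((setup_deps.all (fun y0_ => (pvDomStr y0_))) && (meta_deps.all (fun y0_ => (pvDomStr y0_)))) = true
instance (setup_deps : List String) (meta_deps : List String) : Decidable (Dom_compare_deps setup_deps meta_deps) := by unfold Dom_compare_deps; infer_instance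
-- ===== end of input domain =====

-- B replaces A's hash-map/set pipeline (two dicts, three sorted set differences, lookup-based
-- rendering) by a sort-merge algorithm: reversed-scan last-wins dedup into (name, spec) pairs,
-- sort both pair lists, classify by a two-pointer merge (objective: alternative, same cost).

-- ===== PORT A =====
-- shared helpers: both Pythons split an item into name and optional spec the same way
-- (`it.split(" ", 1)`; sep ≠ "" so splitMax? never returns none), and both render
-- Python's `spec or 'no spec'` (a str is falsy iff empty).
def pvParts (it : String) : List String := (PySem.Str.splitMax? it " " 1).getD []
-- `parts[0]` (split always yields a non-empty list, so no IndexError)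
def pvNameOf (it : String) : String := PySem.List.pyGetD (pvParts it) 0 ""
-- `parts[1] if len(parts) > 1 else ""`
def pvSpecOf (it : String) : String :=
  if 1 < (pvParts it).length then PySem.List.pyGetD (pvParts it) 1 "" else ""
-- A's `to_map` loop: `mapping[name] = spec` over items
def pvToMap (items : List String) : PySem.Dict String String :=
  items.foldl (fun d it => d.insert (pvNameOf it) (pvSpecOf it)) PySem.Dict.empty
def pvOrNoSpec (s : String) : String := if s = "" then "no spec" else s

def compare_deps (setup_deps : List String) (meta_deps : List String) : String :=
  let s_map := pvToMap setup_deps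
  let m_map := pvToMap meta_deps
  let s_names : PySem.Set String := PySem.Set.ofList s_map.keys
  let m_names : PySem.Set String := PySem.Set.ofList m_map.keys
  let missing := PySem.List.sorted (PySem.Set.diff s_names m_names) (fun x => x)
  let extra := PySem.List.sorted (PySem.Set.diff m_names s_names) (fun x => x)
  let mismatches : List (String × String × String) :=
    (PySem.List.sorted (PySem.Set.inter s_names m_names) (fun x => x)).foldl
      (fun acc name =>
        if s_map.getD name "" ≠ m_map.getD name "" then
          acc ++ [(name, s_map.getD name "", m_map.getD name "")]
        else acc) []
  if missing.isEmpty && extra.isEmpty && mismatches.isEmpty then ""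
  else
    -- `s_map[n]` / `m_map[n]` below cannot raise KeyError (n is drawn from the keys),
    -- so they are ported as `(get? n).getD ""`.
    let lines : List String := []
    let lines := if !missing.isEmpty then
        lines ++ ["Missing in meta.yaml run:"]
          ++ missing.map (fun n => "  - " ++ n ++ " (" ++ pvOrNoSpec ((s_map.get? n).getD "") ++ ")")
      else lines
    let lines := if !extra.isEmpty then
        lines ++ ["Extra in meta.yaml run:"]
          ++ extra.map (fun n => "  - " ++ n ++ " (" ++ pvOrNoSpec ((m_map.get? n).getD "") ++ ")")
      else lines
    let lines := if !mismatches.isEmpty then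
        lines ++ ["Version spec mismatches:"]
          ++ mismatches.map (fun t => "  - " ++ t.1 ++ ": setup.cfg='" ++ t.2.1 ++ "' vs meta.yaml='" ++ t.2.2 ++ "'")
      else lines
    PySem.Str.join "\n" lines

-- ===== PORT B =====
-- `sorted_pairs`: reversed scan collecting the first reversed (= last) occurrence of each
-- name with its spec, then sort the pair list by name.
def pvSortedPairs (items : List String) : List (String × String) :=
  let st := items.reverse.foldl
    (fun (st : PySem.Set String × List (String × String)) it =>
      let name := pvNameOf it
      if st.1.contains name then st
      else (st.1.add name, st.2 ++ [(name, pvSpecOf it)]))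
    (PySem.Set.empty, [])
  PySem.List.sorted st.2 (fun p => p.1)

-- the two-pointer merge loop (`while i < len(s) or j < len(m): …`), as the obvious
-- recursion on the two remaining suffixes
def pvMerge : List (String × String) → List (String × String) →
    List String × List String × List String
  | [], [] => ([], [], [])
  | [], (mn, mp) :: m =>
      let r := pvMerge [] m
      (r.1, ("  - " ++ mn ++ " (" ++ pvOrNoSpec mp ++ ")") :: r.2.1, r.2.2)
  | (sn, sp) :: s, [] =>
      let r := pvMerge s []
      (("  - " ++ sn ++ " (" ++ pvOrNoSpec sp ++ ")") :: r.1, r.2.1, r.2.2)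
  | (sn, sp) :: s, (mn, mp) :: m =>
      if sn < mn then
        let r := pvMerge s ((mn, mp) :: m)
        (("  - " ++ sn ++ " (" ++ pvOrNoSpec sp ++ ")") :: r.1, r.2.1, r.2.2)
      else if mn < sn then
        let r := pvMerge ((sn, sp) :: s) m
        (r.1, ("  - " ++ mn ++ " (" ++ pvOrNoSpec mp ++ ")") :: r.2.1, r.2.2)
      else
        let r := pvMerge s m
        (r.1, r.2.1,
         if sp ≠ mp then
           ("  - " ++ sn ++ ": setup.cfg='" ++ sp ++ "' vs meta.yaml='" ++ mp ++ "'") :: r.2.2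
         else r.2.2)
  termination_by s m => s.length + m.length

def compare_deps_alt (setup_deps : List String) (meta_deps : List String) : String :=
  let s := pvSortedPairs setup_deps
  let m := pvSortedPairs meta_deps
  let acc := pvMerge s m
  -- the section-assembly loop over (header, body) pairs
  let lines := [("Missing in meta.yaml run:", acc.1),
                ("Extra in meta.yaml run:", acc.2.1),
                ("Version spec mismatches:", acc.2.2)].foldl
    (fun ls hb => if !hb.2.isEmpty then ls ++ [hb.1] ++ hb.2 else ls) []
  PySem.Str.join "\n" lines

-- ===== PRECONDITION & SPEC =====
def Spec_compare_deps (setup_deps : List String) (meta_deps : List String) (out : String) : Prop := out = compare_deps_alt setup_deps meta_deps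
instance (setup_deps : List String) (meta_deps : List String) (out : String) : Decidable (Spec_compare_deps setup_deps meta_deps out) := by unfold Spec_compare_deps; infer_instance

-- ===== CLAIM (what is proved, stated in full; the proofs are below) =====
def Claim_equal_compare_deps : Prop := ∀ (setup_deps : List String) (meta_deps : List String), Dom_compare_deps setup_deps meta_deps → Spec_compare_deps setup_deps meta_deps (compare_deps setup_deps meta_deps)

-- ===== LEMMAS AND PROOFS =====

-- proof-side shorthands: the two line renderers and A's "last spec for a name"
def pvL1 (p : String × String) : String := "  - " ++ p.1 ++ " (" ++ pvOrNoSpec p.2 ++ ")"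
def pvL3 (n a b : String) : String := "  - " ++ n ++ ": setup.cfg='" ++ a ++ "' vs meta.yaml='" ++ b ++ "'"
def pvLast? (items : List String) (n : String) : Option String :=
  (items.reverse.find? (fun it => pvNameOf it == n)).map pvSpecOf

theorem pv_contains_false (s : PySem.Set String) (x : String) :
    s.contains x = false ↔ x ∉ s := by
  rw [← PySem.Set.contains_iff]
  cases h : PySem.Set.contains s x <;> simp

theorem pvToMap_get? (items : List String) (n : String) :
    (pvToMap items).get? n = pvLast? items n := by
  induction items using List.reverseRecOn with
  | nil => rfl
  | append_singleton xs x ih =>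
    unfold pvToMap at ih ⊢
    rw [List.foldl_append]
    simp only [List.foldl_cons, List.foldl_nil]
    rw [PySem.Dict.get?_insert]
    unfold pvLast? at ih ⊢
    rw [List.reverse_append, List.reverse_singleton, List.singleton_append]
    by_cases h : pvNameOf x = n
    · rw [List.find?_cons_of_pos (by simp [h]), if_pos h.symm]
      simp
    · rw [List.find?_cons_of_neg (by simp [h]), if_neg (fun hn => h hn.symm)]
      exact ih

theorem pvRd_mem (l : List String) (seen : PySem.Set String) (acc : List (String × String))
    (n v : String) :
    (n, v) ∈ (l.foldl
      (fun (st : PySem.Set String × List (String × String)) it =>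
        if st.1.contains (pvNameOf it) then st
        else (st.1.add (pvNameOf it), st.2 ++ [(pvNameOf it, pvSpecOf it)])) (seen, acc)).2 ↔
    (n, v) ∈ acc ∨ (seen.contains n = false ∧
      (l.find? (fun it => pvNameOf it == n)).map pvSpecOf = some v) := by
  induction l generalizing seen acc with
  | nil => simp
  | cons it l ih =>
    simp only [List.foldl_cons]
    by_cases h : pvNameOf it = n
    · rw [List.find?_cons_of_pos (by simp [h]), Option.map_some]
      subst h
      by_cases hc : (pvNameOf it) ∈ seen
      · rw [if_pos (by simp [PySem.Set.contains_iff, hc]), ih]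
        simp [hc]
      · rw [if_neg (by simp [pv_contains_false, hc]), ih]
        have h2 : (seen.add (pvNameOf it)).contains (pvNameOf it) = true := by
          simp [PySem.Set.contains_iff, PySem.Set.mem_add]
        have h3 : seen.contains (pvNameOf it) = false := by simp [pv_contains_false, hc]
        simp only [h2, Bool.true_eq_false, false_and, or_false, h3, true_and,
          List.mem_append, List.mem_singleton, Prod.mk.injEq, true_and, Option.some.injEq]
        constructor
        · rintro (ha | hv); · exact Or.inl ha
          · exact Or.inr hv.symm
        · rintro (ha | hv); · exact Or.inl ha
          · exact Or.inr hv.symm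
    · rw [List.find?_cons_of_neg (by simp [h])]
      by_cases hc : (pvNameOf it) ∈ seen
      · rw [if_pos (by simp [PySem.Set.contains_iff, hc]), ih]
      · rw [if_neg (by simp [pv_contains_false, hc]), ih]
        have h2 : (seen.add (pvNameOf it)).contains n = seen.contains n := by
          by_cases hn : n ∈ (seen : List String)
          · simp [PySem.Set.contains_iff, PySem.Set.mem_add, hn]
          · have ha : ¬ n ∈ seen.add (pvNameOf it) := by
              rw [PySem.Set.mem_add]
              rintro (h1 | h1); · exact hn h1
              · exact h (h1.symm)
            rw [(pv_contains_false _ _).mpr ha, (pv_contains_false _ _).mpr hn]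
        rw [h2]
        have h3 : (n, v) ∈ acc ++ [(pvNameOf it, pvSpecOf it)] ↔ (n, v) ∈ acc := by
          simp only [List.mem_append, List.mem_singleton, Prod.mk.injEq]
          constructor
          · rintro (ha | ⟨h1, _⟩); · exact ha
            · exact absurd h1.symm h
          · exact Or.inl
        rw [h3]

theorem pvToMap_keys_nodup (items : List String) : (pvToMap items).keys.Nodup := by
  unfold pvToMap
  rw [PySem.Dict.keys_foldl_insert_key items pvNameOf (fun _ it => pvSpecOf it) PySem.Dict.empty]
  have h : (PySem.Dict.empty : PySem.Dict String String).keys = [] := rfl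
  rw [h, PySem.Set.update_nil_left]
  exact PySem.Set.nodup_ofList _

theorem pvRd_fst_nodup (l : List String) (seen : PySem.Set String)
    (acc : List (String × String))
    (hinv : ∀ x ∈ acc.map Prod.fst, seen.contains x = true)
    (hnd : (acc.map Prod.fst).Nodup) :
    ((l.foldl
      (fun (st : PySem.Set String × List (String × String)) it =>
        if st.1.contains (pvNameOf it) then st
        else (st.1.add (pvNameOf it), st.2 ++ [(pvNameOf it, pvSpecOf it)])) (seen, acc)).2.map
        Prod.fst).Nodup := by
  induction l generalizing seen acc with
  | nil => simpa using hnd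
  | cons it l ih =>
    simp only [List.foldl_cons]
    by_cases hc : seen.contains (pvNameOf it) = true
    · rw [if_pos hc]; exact ih seen acc hinv hnd
    · rw [if_neg hc]
      apply ih
      · intro x hx
        simp only [List.map_append, List.map_cons, List.map_nil, List.mem_append,
          List.mem_singleton] at hx
        rcases hx with hx | hx
        · have := hinv x hx
          rw [PySem.Set.contains_iff] at this ⊢
          rw [PySem.Set.mem_add]; exact Or.inl this
        · rw [PySem.Set.contains_iff, PySem.Set.mem_add]; exact Or.inr hx
      · simp only [List.map_append, List.map_cons, List.map_nil]
        rw [List.nodup_append]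
        refine ⟨hnd, List.nodup_singleton _, ?_⟩
        intro a ha b hb
        rw [List.mem_singleton] at hb
        subst hb
        exact fun he => hc (he ▸ hinv a ha)

theorem pvSortedPairs_perm (items : List String) :
    (pvSortedPairs items).Perm (pvToMap items).items := by
  unfold pvSortedPairs
  refine (PySem.List.sorted_perm _ _ false).trans ?_
  have hRnd : (((items.reverse.foldl
      (fun (st : PySem.Set String × List (String × String)) it =>
        if st.1.contains (pvNameOf it) then st
        else (st.1.add (pvNameOf it), st.2 ++ [(pvNameOf it, pvSpecOf it)]))
      (PySem.Set.empty, [])).2.map Prod.fst)).Nodup := by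
    apply pvRd_fst_nodup
    · intro x hx; simp at hx
    · simp
  have hInd : (pvToMap items).items.Nodup := by
    have h := pvToMap_keys_nodup items
    exact h.of_map
  rw [List.perm_ext_iff_of_nodup hRnd.of_map hInd]
  rintro ⟨n, v⟩
  rw [pvRd_mem]
  have hempty : (PySem.Set.empty : PySem.Set String).contains n = false := rfl
  simp only [List.not_mem_nil, false_or, hempty, true_and]
  have hL : pvLast? items n = Option.map pvSpecOf (items.reverse.find? (fun it => pvNameOf it == n)) := rfl
  rw [← hL, ← pvToMap_get? items n]
  exact (PySem.Dict.get?_eq_some_iff_mem_items (pvToMap items) n v (pvToMap_keys_nodup items))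

theorem pvSortedPairs_fst_nodup (items : List String) :
    ((pvSortedPairs items).map Prod.fst).Nodup := by
  have hp := (pvSortedPairs_perm items).map Prod.fst
  rw [hp.nodup_iff]
  exact pvToMap_keys_nodup items

theorem pvSortedPairs_pairwise (items : List String) :
    (pvSortedPairs items).Pairwise (fun p q => p.1 < q.1) := by
  have h1 : (pvSortedPairs items).Pairwise (fun p q => p.1 ≤ q.1) := by
    unfold pvSortedPairs
    exact PySem.List.sorted_pairwise _ _
  have h2 : (pvSortedPairs items).Pairwise (fun p q => p.1 ≠ q.1) := by
    have := pvSortedPairs_fst_nodup items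
    rw [List.Nodup, List.pairwise_map] at this
    exact this
  exact (h1.and h2).imp (fun h => lt_of_le_of_ne h.1 h.2)

theorem pvLookup_cons_ne (a x v : String) (l : List (String × String)) (h : ¬ x = a) :
    ((a, v) :: l).lookup x = l.lookup x := by
  rw [List.lookup_cons, show (x == a) = false from by simp [h]]

theorem pvLookup_cons_self (a v : String) (l : List (String × String)) :
    ((a, v) :: l).lookup a = some v := by
  rw [List.lookup_cons, show (a == a) = true from by simp]

theorem pv_names_not_contains {x : String} {l : List (String × String)}
    (h : ∀ q ∈ l, x < q.1) : (l.map Prod.fst).contains x = false := by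
  rw [List.contains_eq_mem, decide_eq_false_iff_not]
  intro hm
  rcases List.mem_map.mp hm with ⟨q, hq, he⟩
  exact absurd (he ▸ h q hq) (lt_irrefl x)

theorem pvMerge_spec (s m : List (String × String))
    (hs : s.Pairwise (fun p q => p.1 < q.1)) (hm : m.Pairwise (fun p q => p.1 < q.1)) :
    pvMerge s m =
      ((s.filter (fun p => !(m.map Prod.fst).contains p.1)).map pvL1,
       (m.filter (fun p => !(s.map Prod.fst).contains p.1)).map pvL1,
       ((s.filter (fun p => (m.map Prod.fst).contains p.1)).filter
          (fun p => decide (p.2 ≠ ((m.lookup p.1).getD "")))).map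
         (fun p => pvL3 p.1 p.2 ((m.lookup p.1).getD ""))) := by
  induction s, m using pvMerge.induct with
  | case1 => simp [pvMerge]
  | case2 mn mp m ih =>
    rw [List.pairwise_cons] at hm
    have h := ih hs hm.2
    simp only [pvMerge, h, Prod.mk.injEq]
    refine ⟨rfl, ?_, rfl⟩
    simp [pvL1]
  | case3 sn sp s ih =>
    rw [List.pairwise_cons] at hs
    have h := ih hs.2 hm
    simp only [pvMerge, h, Prod.mk.injEq]
    refine ⟨?_, rfl, rfl⟩
    simp [pvL1]
  | case4 sn sp s mn mp m hlt ih =>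
    rw [List.pairwise_cons] at hs
    have hmn : ∀ q ∈ (mn, mp) :: m, sn < q.1 := by
      rw [List.pairwise_cons] at hm
      intro q hq
      rw [List.mem_cons] at hq
      rcases hq with rfl | hq
      · exact hlt
      · exact hlt.trans (hm.1 q hq)
    have h := ih hs.2 hm
    simp only [pvMerge, if_pos hlt, h, Prod.mk.injEq]
    refine ⟨?_, ?_, ?_⟩
    · rw [List.filter_cons_of_pos (by rw [pv_names_not_contains hmn]; rfl), List.map_cons]
      rfl
    · apply congrArg (List.map pvL1)
      apply List.filter_congr
      intro q hq
      have hne : ¬ q.1 = sn := fun he => absurd (he ▸ hmn q hq) (lt_irrefl _)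
      simp only [List.map_cons, List.contains_cons]
      rw [show (q.1 == sn) = false from by simp [hne], Bool.false_or]
    · rw [List.filter_cons_of_neg (by rw [pv_names_not_contains hmn]; simp)]
  | case5 sn sp s mn mp m hnlt hlt ih =>
    rw [List.pairwise_cons] at hm
    have hsn : ∀ q ∈ (sn, sp) :: s, mn < q.1 := by
      rw [List.pairwise_cons] at hs
      intro q hq
      rw [List.mem_cons] at hq
      rcases hq with rfl | hq
      · exact hlt
      · exact hlt.trans (hs.1 q hq)
    have h := ih hs hm.2
    simp only [pvMerge, if_neg hnlt, if_pos hlt, h, Prod.mk.injEq]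
    have hq1 : ∀ q ∈ (sn, sp) :: s, ¬ q.1 = mn :=
      fun q hq he => absurd (he ▸ hsn q hq) (lt_irrefl _)
    refine ⟨?_, ?_, ?_⟩
    · apply congrArg (List.map pvL1)
      apply List.filter_congr
      intro q hq
      simp only [List.map_cons, List.contains_cons]
      rw [show (q.1 == mn) = false from by simp [hq1 q hq], Bool.false_or]
    · rw [List.filter_cons_of_pos (by rw [pv_names_not_contains hsn]; rfl), List.map_cons]
      rfl
    · have hfeq : ((sn, sp) :: s).filter (fun p => (((mn, mp) :: m).map Prod.fst).contains p.1)
          = ((sn, sp) :: s).filter (fun p => (m.map Prod.fst).contains p.1) := by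
        apply List.filter_congr
        intro q hq
        simp only [List.map_cons, List.contains_cons]
        rw [show (q.1 == mn) = false from by simp [hq1 q hq], Bool.false_or]
      rw [hfeq]
      have hlk : ∀ q ∈ (sn, sp) :: s, ((mn, mp) :: m).lookup q.1 = m.lookup q.1 :=
        fun q hq => pvLookup_cons_ne mn q.1 mp m (hq1 q hq)
      have hf2 : (((sn, sp) :: s).filter (fun p => (m.map Prod.fst).contains p.1)).filter
            (fun p => decide (p.2 ≠ ((((mn, mp) :: m).lookup p.1).getD "")))
          = (((sn, sp) :: s).filter (fun p => (m.map Prod.fst).contains p.1)).filter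
            (fun p => decide (p.2 ≠ ((m.lookup p.1).getD ""))) := by
        apply List.filter_congr
        intro q hq
        rw [hlk q (List.mem_of_mem_filter hq)]
      rw [hf2]
      apply List.map_congr_left
      intro q hq
      rw [hlk q (List.mem_of_mem_filter (List.mem_of_mem_filter hq))]
  | case6 sn sp s mn mp m hnlt hnlt2 ih =>
    have heq : sn = mn := le_antisymm (not_lt.mp hnlt2) (not_lt.mp hnlt)
    subst heq
    rw [List.pairwise_cons] at hs hm
    have h := ih hs.2 hm.2
    simp only [pvMerge, if_neg hnlt, if_neg hnlt2, h, Prod.mk.injEq]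
    have hq1 : ∀ q ∈ s, ¬ q.1 = sn :=
      fun q hq he => absurd (he ▸ hs.1 q hq) (lt_irrefl _)
    have hq2 : ∀ q ∈ m, ¬ q.1 = sn :=
      fun q hq he => absurd (he ▸ hm.1 q hq) (lt_irrefl _)
    refine ⟨?_, ?_, ?_⟩
    · rw [List.filter_cons_of_neg (by simp)]
      apply congrArg (List.map pvL1)
      apply List.filter_congr
      intro q hq
      simp only [List.map_cons, List.contains_cons]
      rw [show (q.1 == sn) = false from by simp [hq1 q hq], Bool.false_or]
    · rw [List.filter_cons_of_neg (by simp)]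
      apply congrArg (List.map pvL1)
      apply List.filter_congr
      intro q hq
      simp only [List.map_cons, List.contains_cons]
      rw [show (q.1 == sn) = false from by simp [hq2 q hq], Bool.false_or]
    · have hfeq : (((sn, sp) :: s).filter (fun p => (((sn, mp) :: m).map Prod.fst).contains p.1))
          = (sn, sp) :: (s.filter (fun p => (m.map Prod.fst).contains p.1)) := by
        rw [List.filter_cons_of_pos (by simp)]
        congr 1
        apply List.filter_congr
        intro q hq
        simp only [List.map_cons, List.contains_cons]
        rw [show (q.1 == sn) = false from by simp [hq1 q hq], Bool.false_or]
      rw [hfeq]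
      have hlk : ∀ q ∈ s, ((sn, mp) :: m).lookup q.1 = m.lookup q.1 :=
        fun q hq => pvLookup_cons_ne sn q.1 mp m (hq1 q hq)
      rw [List.filter_cons, pvLookup_cons_self]
      have hf2 : (s.filter (fun p => (m.map Prod.fst).contains p.1)).filter
            (fun p => decide (p.2 ≠ ((((sn, mp) :: m).lookup p.1).getD "")))
          = (s.filter (fun p => (m.map Prod.fst).contains p.1)).filter
            (fun p => decide (p.2 ≠ ((m.lookup p.1).getD ""))) := by
        apply List.filter_congr
        intro q hq
        rw [hlk q (List.mem_of_mem_filter hq)]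
      have hmapeq : ∀ (L : List (String × String)), (∀ q ∈ L, q ∈ s) →
          L.map (fun p => pvL3 p.1 p.2 ((((sn, mp) :: m).lookup p.1).getD ""))
            = L.map (fun p => pvL3 p.1 p.2 ((m.lookup p.1).getD "")) := by
        intro L hL
        apply List.map_congr_left
        intro q hq
        rw [hlk q (hL q hq)]
      by_cases hd : sp ≠ mp
      · rw [if_pos hd, if_pos (by simp [hd])]
        rw [List.map_cons, hf2]
        refine congrArg₂ _ ?_ ?_
        · simp [pvL3, pvLookup_cons_self]
        · exact (hmapeq _ (fun q hq => List.mem_of_mem_filter (List.mem_of_mem_filter hq))).symm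
      · rw [if_neg hd, if_neg (by simp at hd ⊢; exact hd)]
        rw [hf2]
        exact (hmapeq _ (fun q hq => List.mem_of_mem_filter (List.mem_of_mem_filter hq))).symm

theorem pvLookup_of_mem (L : List (String × String)) (hnd : (L.map Prod.fst).Nodup)
    (n v : String) (hm : (n, v) ∈ L) : L.lookup n = some v := by
  induction L with
  | nil => cases hm
  | cons q L ih =>
    obtain ⟨a, b⟩ := q
    rw [List.map_cons, List.nodup_cons] at hnd
    rw [List.mem_cons] at hm
    rcases hm with he | hm
    · cases he
      exact pvLookup_cons_self n v L
    · have hne : ¬ n = a := by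
        intro he2
        rw [← he2] at hnd
        exact hnd.1 (List.mem_map.mpr ⟨(n, v), hm, rfl⟩)
      rw [pvLookup_cons_ne a n b L hne]
      exact ih hnd.2 hm

theorem pvVal (its : List String) (p : String × String) (hp : p ∈ pvSortedPairs its) :
    (pvToMap its).get? p.1 = some p.2 := by
  have hi : p ∈ (pvToMap its).items := (pvSortedPairs_perm its).mem_iff.mp hp
  obtain ⟨n, v⟩ := p
  exact PySem.Dict.get?_of_mem_items _ hi (pvToMap_keys_nodup its)

theorem pvFst_iff (its : List String) (x : String) :
    x ∈ (pvSortedPairs its).map Prod.fst ↔ x ∈ (pvToMap its).keys := by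
  exact ((pvSortedPairs_perm its).map Prod.fst).mem_iff

theorem pvSortedSel (its : List String) (b : String → Bool) (xs : List String)
    (hnd : xs.Nodup)
    (hmem : ∀ x, x ∈ xs ↔ x ∈ (pvToMap its).keys ∧ b x = true) :
    PySem.List.sorted xs (fun x => x)
      = ((pvSortedPairs its).filter (fun p => b p.1)).map Prod.fst := by
  apply PySem.List.sorted_eq_of_perm_of_pairwise_lt
  · have hsub : (List.filter (fun p => b p.1) (pvSortedPairs its)).Sublist (pvSortedPairs its) :=
      List.filter_sublist
    have hLnd : (((pvSortedPairs its).filter (fun p => b p.1)).map Prod.fst).Nodup :=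
      (pvSortedPairs_fst_nodup its).sublist (hsub.map Prod.fst)
    rw [List.perm_ext_iff_of_nodup hLnd hnd]
    intro x
    rw [hmem x]
    constructor
    · intro hx
      rcases List.mem_map.mp hx with ⟨p, hp, he⟩
      rcases List.mem_filter.mp hp with ⟨hpP, hb⟩
      subst he
      exact ⟨(pvFst_iff its p.1).mp (List.mem_map_of_mem hpP), hb⟩
    · rintro ⟨hk, hb⟩
      rcases List.mem_map.mp ((pvFst_iff its x).mpr hk) with ⟨p, hp, he⟩
      subst he
      exact List.mem_map_of_mem (List.mem_filter.mpr ⟨hp, hb⟩)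
  · rw [List.pairwise_map]
    exact List.Pairwise.sublist List.filter_sublist (pvSortedPairs_pairwise its)

-- ===== VERDICT (by name: the statement is the Claim_ definition above) =====
theorem compare_deps_spec : Claim_equal_compare_deps := by
  intro setup mt _
  unfold Spec_compare_deps
  show compare_deps setup mt = compare_deps_alt setup mt
  simp only [compare_deps, compare_deps_alt]
  rw [pvMerge_spec (pvSortedPairs setup) (pvSortedPairs mt)
      (pvSortedPairs_pairwise setup) (pvSortedPairs_pairwise mt)]
  set sm := pvToMap setup with hsm
  set mm := pvToMap mt with hmm
  set Ps := pvSortedPairs setup with hPs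
  set Pm := pvSortedPairs mt with hPm
  -- A's three sorted name lists, as filters of the sorted pair lists
  have hmiss : PySem.List.sorted
      (PySem.Set.diff (PySem.Set.ofList sm.keys) (PySem.Set.ofList mm.keys)) (fun x => x)
      = (Ps.filter (fun p => !(Pm.map Prod.fst).contains p.1)).map Prod.fst := by
    apply pvSortedSel setup (fun x => !(Pm.map Prod.fst).contains x)
    · exact PySem.Set.nodup_diff _ _ (PySem.Set.nodup_ofList _)
    · intro x
      rw [PySem.Set.mem_diff]
      simp only [PySem.Set.mem_ofList, List.contains_eq_mem, Bool.not_eq_true',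
        decide_eq_false_iff_not, hPm, pvFst_iff, hsm, hmm]
  have hextra : PySem.List.sorted
      (PySem.Set.diff (PySem.Set.ofList mm.keys) (PySem.Set.ofList sm.keys)) (fun x => x)
      = (Pm.filter (fun p => !(Ps.map Prod.fst).contains p.1)).map Prod.fst := by
    apply pvSortedSel mt (fun x => !(Ps.map Prod.fst).contains x)
    · exact PySem.Set.nodup_diff _ _ (PySem.Set.nodup_ofList _)
    · intro x
      rw [PySem.Set.mem_diff]
      simp only [PySem.Set.mem_ofList, List.contains_eq_mem, Bool.not_eq_true',
        decide_eq_false_iff_not, hPs, pvFst_iff, hsm, hmm]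
  have hinter : PySem.List.sorted
      (PySem.Set.inter (PySem.Set.ofList sm.keys) (PySem.Set.ofList mm.keys)) (fun x => x)
      = (Ps.filter (fun p => (Pm.map Prod.fst).contains p.1)).map Prod.fst := by
    apply pvSortedSel setup (fun x => (Pm.map Prod.fst).contains x)
    · exact PySem.Set.nodup_inter _ _ (PySem.Set.nodup_ofList _)
    · intro x
      rw [PySem.Set.mem_inter]
      simp only [PySem.Set.mem_ofList, List.contains_eq_mem, decide_eq_true_eq,
        hPm, pvFst_iff, hsm, hmm]
  rw [hmiss, hextra, hinter]
  -- values: a pair of Ps / Pm gives the dict lookups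
  have hvalS : ∀ p ∈ Ps, (sm.get? p.1).getD "" = p.2 := by
    intro p hp; rw [hsm, pvVal setup p (hPs ▸ hp)]; rfl
  have hvalM : ∀ p ∈ Pm, (mm.get? p.1).getD "" = p.2 := by
    intro p hp; rw [hmm, pvVal mt p (hPm ▸ hp)]; rfl
  have hlkM : ∀ p : String × String, (Pm.map Prod.fst).contains p.1 = true →
      (mm.get? p.1).getD "" = (Pm.lookup p.1).getD "" := by
    intro p hc
    rw [List.contains_eq_mem, decide_eq_true_eq] at hc
    rcases List.mem_map.mp hc with ⟨q, hq, he⟩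
    rw [← he, hmm, pvVal mt q (hPm ▸ hq),
      pvLookup_of_mem Pm (hPm ▸ pvSortedPairs_fst_nodup mt) q.1 q.2 hq]
  -- A's mismatch loop is a filter + map over the sorted intersection
  rw [show (List.foldl (fun acc name =>
        if sm.getD name "" ≠ mm.getD name "" then
          acc ++ [(name, sm.getD name "", mm.getD name "")] else acc) []
        ((Ps.filter (fun p => (Pm.map Prod.fst).contains p.1)).map Prod.fst))
      = (((Ps.filter (fun p => (Pm.map Prod.fst).contains p.1)).map Prod.fst).filter
          (fun n => decide (sm.getD n "" ≠ mm.getD n ""))).map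
          (fun n => (n, sm.getD n "", mm.getD n "")) from by
    simpa using PySem.List.foldl_append_ite
      (fun name => sm.getD name "" ≠ mm.getD name "")
      (fun name => (name, sm.getD name "", mm.getD name "")) _ []]
  rw [List.filter_map]
  simp only [List.map_map]
  have hq3 : (Ps.filter (fun p => (Pm.map Prod.fst).contains p.1)).filter
        ((fun n => decide (sm.getD n "" ≠ mm.getD n "")) ∘ Prod.fst)
      = (Ps.filter (fun p => (Pm.map Prod.fst).contains p.1)).filter
        (fun p => decide (p.2 ≠ ((Pm.lookup p.1).getD ""))) := by
    apply List.filter_congr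
    intro p hp
    have hc := (List.mem_filter.mp hp).2
    simp only [Function.comp, PySem.Dict.getD_eq_get?_getD,
      hvalS p (List.mem_of_mem_filter hp), hlkM p hc]
  rw [hq3]
  have hb1 : (Ps.filter (fun p => !(Pm.map Prod.fst).contains p.1)).map
        ((fun n => "  - " ++ n ++ " (" ++ pvOrNoSpec ((sm.get? n).getD "") ++ ")") ∘ Prod.fst)
      = (Ps.filter (fun p => !(Pm.map Prod.fst).contains p.1)).map pvL1 := by
    apply List.map_congr_left
    intro p hp
    simp only [Function.comp, pvL1, hvalS p (List.mem_of_mem_filter hp)]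
  have hb2 : (Pm.filter (fun p => !(Ps.map Prod.fst).contains p.1)).map
        ((fun n => "  - " ++ n ++ " (" ++ pvOrNoSpec ((mm.get? n).getD "") ++ ")") ∘ Prod.fst)
      = (Pm.filter (fun p => !(Ps.map Prod.fst).contains p.1)).map pvL1 := by
    apply List.map_congr_left
    intro p hp
    simp only [Function.comp, pvL1, hvalM p (List.mem_of_mem_filter hp)]
  have htrip : ((Ps.filter (fun p => (Pm.map Prod.fst).contains p.1)).filter
        (fun p => decide (p.2 ≠ ((Pm.lookup p.1).getD "")))).map
        ((fun t : String × String × String =>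
          "  - " ++ t.1 ++ ": setup.cfg=\'" ++ t.2.1 ++ "\' vs meta.yaml=\'" ++ t.2.2 ++ "\'") ∘
         ((fun n => (n, sm.getD n "", mm.getD n "")) ∘ Prod.fst))
      = ((Ps.filter (fun p => (Pm.map Prod.fst).contains p.1)).filter
        (fun p => decide (p.2 ≠ ((Pm.lookup p.1).getD "")))).map
        (fun p => pvL3 p.1 p.2 ((Pm.lookup p.1).getD "")) := by
    apply List.map_congr_left
    intro p hp
    have hpP : p ∈ Ps := List.mem_of_mem_filter (List.mem_of_mem_filter hp)
    have hc : (Pm.map Prod.fst).contains p.1 = true :=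
      (List.mem_filter.mp (List.mem_of_mem_filter hp)).2
    simp only [Function.comp, pvL3, PySem.Dict.getD_eq_get?_getD, hvalS p hpP, hlkM p hc]
  rw [hb1, hb2, htrip]
  generalize (Ps.filter (fun p => !(Pm.map Prod.fst).contains p.1)) = b1
  generalize (Pm.filter (fun p => !(Ps.map Prod.fst).contains p.1)) = b2
  generalize ((Ps.filter (fun p => (Pm.map Prod.fst).contains p.1)).filter
      (fun p => decide (p.2 ≠ ((Pm.lookup p.1).getD "")))) = b3
  simp only [List.foldl_cons, List.foldl_nil, List.isEmpty_map, List.nil_append]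
  cases b1 <;> cases b2 <;> cases b3 <;> rfl
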